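-- pv_equiv track=rewrite | github.com/ynyeh0221/ai-model-management-rag-system | src/query_engine/result_ranker.py | version_aware_ranking
-- ===== SOURCE A (Python) =====
-- from typing import List, Dict, Any, Optional, Callable
--
-- def version_aware_ranking(
--                          results: List[Dict[str, Any]],
--                          model_id_field: str = "metadata.model_id",
--                          version_field: str = "metadata.version") -> List[Dict[str, Any]]:
--     """
--     Rank results with preference for newer versions of the same model.
--
--     This ranking will group results by model family and then prioritize
--     newer versions within each family.
--
--     Args:
--         results: List of result objects to rank
--         model_id_field: Field path for model ID
--         version_field: Field path for version
--
--     Returns: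
--         Ranked list of results
--     """
--     def _get_nested_value(result, field_path):
--         """Extract value from nested dictionary using dot notation field path."""
--         parts = field_path.split('.')
--         value = result
--         for part in parts:
--             if isinstance(value, dict) and part in value:
--                 value = value[part]
--             else:
--                 # If path doesn't exist, return None
--                 return None
--         return value
--
--     def _parse_version(version_str):
--         """Parse version string into comparable components."""
--         if not version_str or not isinstance(version_str, str):
--             return (0, 0, 0)
--
--         # Remove 'v' prefix if present
--         if version_str.lower().startswith('v'):
--             version_str = version_str[1:]
--
--         # Split by dots
--         parts = version_str.split('.')
--         components = []
--
--         # Convert parts to integers, filling with zeros if needed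
--         for part in parts:
--             try:
--                 components.append(int(part))
--             except ValueError:
--                 # If part contains non-numeric characters, stop parsing
--                 break
--
--         # Ensure we have at least 3 components (major, minor, patch)
--         while len(components) < 3:
--             components.append(0)
--
--         return tuple(components)
--
--     # Group results by model family/ID
--     model_groups = {}
--     for result in results:
--         model_id = _get_nested_value(result, model_id_field)
--         # Extract base model ID (without version suffix if present)
--         base_model_id = model_id.split('-v')[0] if model_id and isinstance(model_id, str) else 'unknown'
--
--         if base_model_id not in model_groups:
--             model_groups[base_model_id] = []
--
--         model_groups[base_model_id].append(result)
--
--     # Sort each group by version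
--     for base_model_id in model_groups:
--         model_groups[base_model_id].sort(
--             key=lambda x: _parse_version(_get_nested_value(x, version_field)),
--             reverse=True  # Higher version first
--         )
--
--     # Flatten the groups, interleaving results for diversity
--     sorted_results = []
--     while any(model_groups.values()):
--         for base_model_id in list(model_groups.keys()):
--             if model_groups[base_model_id]:
--                 sorted_results.append(model_groups[base_model_id].pop(0))
--
--     return sorted_results
-- ===== SOURCE B (Python) =====
-- from typing import List, Dict, Any
--
-- def version_aware_ranking(
--                          results: List[Dict[str, Any]],
--                          model_id_field: str = "metadata.model_id",
--                          version_field: str = "metadata.version") -> List[Dict[str, Any]]: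
--     """Group by base model id, sort each group by version (newest first), and
--     interleave the groups round-robin — computed as one flat sort over
--     (within-group position, group index) keys instead of repeated popping."""
--
--     def _get_nested_value(value, parts):
--         if not parts:
--             return value
--         if isinstance(value, dict) and parts[0] in value:
--             return _get_nested_value(value[parts[0]], parts[1:])
--         return None
--
--     def _int_prefix(parts):
--         """Integers of the leading int-parsable parts (recursive takewhile)."""
--         if not parts:
--             return []
--         try:
--             n = int(parts[0])
--         except ValueError:
--             return []
--         return [n] + _int_prefix(parts[1:])
--
--     def _version_key(result):
--         v = _get_nested_value(result, version_field.split('.'))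
--         if not v or not isinstance(v, str):
--             return (0, 0, 0)
--         s = v[1:] if v.lower().startswith('v') else v
--         comps = _int_prefix(s.split('.'))
--         return tuple(comps + [0] * (3 - len(comps)))
--
--     def _base_id(result):
--         m = _get_nested_value(result, model_id_field.split('.'))
--         return m.split('-v')[0] if m and isinstance(m, str) else 'unknown'
--
--     ids = [_base_id(r) for r in results]
--     order = []
--     for i in ids:
--         if i not in order:
--             order.append(i)
--
--     n = len(results)
--     tagged = []
--     for gi, key in enumerate(order):
--         group = sorted((r for r, k in zip(results, ids) if k == key),
--                        key=_version_key, reverse=True)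
--         for pos, item in enumerate(group):
--             tagged.append((pos, gi, item))
--
--     # pos-major, group-minor: the round-robin order, via one composite-rank sort
--     tagged.sort(key=lambda t: t[0] * (n + 1) + t[1])
--     return [t[2] for t in tagged]
-- ===== Notes on version B (the rewrite author's own statement) =====
-- stated objective: alternative
-- what changed: B drops A's dict-of-lists grouping and mutating while-any/pop(0) round-robin: it builds the groups by filtering over a first-occurrence key list and produces the interleaved order with one flat stable sort over precomputed (within-group position, group index) composite keys.
import Mathlib
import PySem

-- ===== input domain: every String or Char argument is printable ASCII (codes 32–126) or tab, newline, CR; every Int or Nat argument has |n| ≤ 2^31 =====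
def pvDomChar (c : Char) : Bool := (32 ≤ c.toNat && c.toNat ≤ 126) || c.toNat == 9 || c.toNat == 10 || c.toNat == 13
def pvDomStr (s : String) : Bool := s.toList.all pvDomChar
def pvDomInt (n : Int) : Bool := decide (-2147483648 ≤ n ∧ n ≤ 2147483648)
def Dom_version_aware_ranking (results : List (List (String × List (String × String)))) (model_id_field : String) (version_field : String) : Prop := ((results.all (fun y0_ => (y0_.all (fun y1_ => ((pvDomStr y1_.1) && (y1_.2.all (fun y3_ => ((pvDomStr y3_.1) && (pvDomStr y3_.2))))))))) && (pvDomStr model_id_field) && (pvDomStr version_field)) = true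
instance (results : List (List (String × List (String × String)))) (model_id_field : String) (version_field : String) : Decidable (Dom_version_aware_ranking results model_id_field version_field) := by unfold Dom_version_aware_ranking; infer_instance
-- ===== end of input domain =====

-- B replaces A's mutating `while any(...)`/`pop(0)` round-robin (and the dict-of-lists
-- grouping) by a single flat sort over precomputed (within-group position, group index)
-- keys over filter-built groups; objective: alternative decomposition, same results.

-- a value reached while walking the nested dicts: the outer result dict,
-- an inner dict, or a string leaf
inductive PvVal where
  | vouter : List (String × List (String × String)) → PvVal
  | vinner : List (String × String) → PvVal
  | vstr : String → PvVal
deriving DecidableEq, Repr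

-- ===== PORT A =====

-- one step of A's `for part in parts` walk (None propagates, matching A's early return)
def pvGetStepA : Option PvVal → String → Option PvVal
  | some (PvVal.vouter d), p => ((PySem.Dict.mk d).get? p).map PvVal.vinner
  | some (PvVal.vinner d), p => ((PySem.Dict.mk d).get? p).map PvVal.vstr
  | _, _ => none

-- A._get_nested_value
def pvGetNestedA (r : List (String × List (String × String))) (path : String) : Option PvVal :=
  ((PySem.Chars.splitOn path.toList ['.']).map String.ofList).foldl pvGetStepA (some (PvVal.vouter r))

-- A's `for part in parts: try int(part) … except: break` loop
def pvCollectA : List (List Char) → List Int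
  | [] => []
  | p :: ps =>
    match PySem.Int.ofChars? p with
    | some n => n :: pvCollectA ps
    | none => []

-- A's `while len(components) < 3: components.append(0)`
def pvPadA (l : List Int) : List Int :=
  if l.length < 3 then pvPadA (l ++ [0]) else l
termination_by 3 - l.length

-- A._parse_version applied to a fetched value
def pvParseVersionA (v : Option PvVal) : List Int :=
  match v with
  | some (PvVal.vstr s) =>
    if s = "" then [0, 0, 0]
    else
      let cs := s.toList
      let cs := if PySem.Chars.startswith (PySem.Chars.lower cs) ['v'] then cs.drop 1 else cs
      pvPadA (pvCollectA (PySem.Chars.splitOn cs ['.']))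
  | _ => [0, 0, 0]

-- A's `model_id.split('-v')[0] if model_id and isinstance(model_id, str) else 'unknown'`
def pvBaseA (v : Option PvVal) : String :=
  match v with
  | some (PvVal.vstr s) =>
    if s = "" then "unknown" else String.ofList ((PySem.Chars.splitOn s.toList ['-', 'v']).headD [])
  | _ => "unknown"

theorem pv_sum_tail_le {α : Type} (gs : List (List α)) :
    ((gs.map List.tail).map List.length).sum ≤ (gs.map List.length).sum := by
  induction gs with
  | nil => simp
  | cons g rest ih =>
    simp only [List.map_cons, List.sum_cons]
    have : g.tail.length ≤ g.length := by cases g <;> simp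
    omega

theorem pv_sum_tail_lt {α : Type} (gs : List (List α)) (h : gs.all List.isEmpty = false) :
    ((gs.map List.tail).map List.length).sum < (gs.map List.length).sum := by
  induction gs with
  | nil => simp at h
  | cons g rest ih =>
    simp only [List.all_cons, Bool.and_eq_false_iff] at h
    simp only [List.map_cons, List.sum_cons]
    rcases h with h | h
    · have : g.tail.length < g.length := by
        cases g with
        | nil => simp at h
        | cons x t => simp
      have := pv_sum_tail_le rest
      omega
    · have := ih h
      have : g.tail.length ≤ g.length := by cases g <;> simp
      omega

-- A's `while any(model_groups.values()): for key …: pop(0)` round-robin flatten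
def pvRR {α : Type} (gs : List (List α)) : List α :=
  if h : gs.all List.isEmpty then [] else
    gs.filterMap List.head? ++ pvRR (gs.map List.tail)
termination_by (gs.map List.length).sum
decreasing_by exact pv_sum_tail_lt gs (by simpa using h)

def version_aware_ranking (results : List (List (String × List (String × String)))) (model_id_field : String) (version_field : String) : List (List (String × List (String × String))) :=
  let d := results.foldl (fun d r =>
      let k := pvBaseA (pvGetNestedA r model_id_field)
      let d' := if d.contains k then d else d.insert k ([] : List (List (String × List (String × String))))
      d'.modify k [] (fun g => g ++ [r])) PySem.Dict.empty
  let gs := d.keys.map (fun k =>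
      PySem.List.sorted (d.getD k []) (fun r => pvParseVersionA (pvGetNestedA r version_field)) true)
  pvRR gs

-- ===== PORT B =====

-- B._get_nested_value (recursive on the remaining path)
def pvGetB : PvVal → List String → Option PvVal
  | v, [] => some v
  | PvVal.vouter d, p :: ps =>
    match (PySem.Dict.mk d).get? p with
    | some x => pvGetB (PvVal.vinner x) ps
    | none => none
  | PvVal.vinner d, p :: ps =>
    match (PySem.Dict.mk d).get? p with
    | some x => pvGetB (PvVal.vstr x) ps
    | none => none
  | PvVal.vstr _, _ :: _ => none

-- B._int_prefix (recursive takewhile of int-parsable parts)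
def pvIntPrefixB : List (List Char) → List Int
  | [] => []
  | p :: ps =>
    match PySem.Int.ofChars? p with
    | some n => n :: pvIntPrefixB ps
    | none => []

-- B._version_key
def pvVKeyB (version_field : String) (r : List (String × List (String × String))) : List Int :=
  match pvGetB (PvVal.vouter r) ((PySem.Chars.splitOn version_field.toList ['.']).map String.ofList) with
  | some (PvVal.vstr s) =>
    if s = "" then [0, 0, 0]
    else
      let cs := if PySem.Chars.startswith (PySem.Chars.lower s.toList) ['v'] then s.toList.drop 1 else s.toList
      let comps := pvIntPrefixB (PySem.Chars.splitOn cs ['.'])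
      comps ++ List.replicate (3 - comps.length) 0
  | _ => [0, 0, 0]

-- B._base_id
def pvBaseB (model_id_field : String) (r : List (String × List (String × String))) : String :=
  match pvGetB (PvVal.vouter r) ((PySem.Chars.splitOn model_id_field.toList ['.']).map String.ofList) with
  | some (PvVal.vstr s) =>
    if s = "" then "unknown" else String.ofList ((PySem.Chars.splitOn s.toList ['-', 'v']).headD [])
  | _ => "unknown"

def version_aware_ranking_alt (results : List (List (String × List (String × String)))) (model_id_field : String) (version_field : String) : List (List (String × List (String × String))) :=
  let ids := results.map (pvBaseB model_id_field)
  let order := ids.foldl (fun acc i => if acc.contains i then acc else acc ++ [i]) []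
  let n : Int := results.length
  let tagged := (PySem.List.enumerate order).flatMap (fun gk =>
      (PySem.List.enumerate
        (PySem.List.sorted (((results.zip ids).filter (fun rk => rk.2 == gk.2)).map (·.1))
          (pvVKeyB version_field) true)).map (fun pi => (pi.1, gk.1, pi.2)))
  (PySem.List.sorted tagged (fun t => t.1 * (n + 1) + t.2.1) false).map (fun t => t.2.2)

-- ===== PRECONDITION & SPEC =====
def Spec_version_aware_ranking (results : List (List (String × List (String × String)))) (model_id_field : String) (version_field : String) (out : List (List (String × List (String × String)))) : Prop := out = version_aware_ranking_alt results model_id_field version_field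
instance (results : List (List (String × List (String × String)))) (model_id_field : String) (version_field : String) (out : List (List (String × List (String × String)))) : Decidable (Spec_version_aware_ranking results model_id_field version_field out) := by unfold Spec_version_aware_ranking; infer_instance

-- ===== CLAIM (what is proved, stated in full; the proofs are below) =====
def Claim_equal_version_aware_ranking : Prop := ∀ (results : List (List (String × List (String × String)))) (model_id_field : String) (version_field : String), Dom_version_aware_ranking results model_id_field version_field → Spec_version_aware_ranking results model_id_field version_field (version_aware_ranking results model_id_field version_field)

-- ===== LEMMAS AND PROOFS =====

theorem pvGetStepA_none (ps : List String) : ps.foldl pvGetStepA none = none := by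
  induction ps with
  | nil => rfl
  | cons p ps ih => simpa [pvGetStepA] using ih

theorem pvGet_eq (ps : List String) (v : PvVal) :
    ps.foldl pvGetStepA (some v) = pvGetB v ps := by
  induction ps generalizing v with
  | nil => rfl
  | cons p ps ih =>
    cases v with
    | vouter d =>
      simp only [List.foldl_cons, pvGetStepA, pvGetB]
      cases (PySem.Dict.mk d).get? p with
      | none => simpa using pvGetStepA_none ps
      | some x => simpa using ih (PvVal.vinner x)
    | vinner d =>
      simp only [List.foldl_cons, pvGetStepA, pvGetB]
      cases (PySem.Dict.mk d).get? p with
      | none => simpa using pvGetStepA_none ps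
      | some x => simpa using ih (PvVal.vstr x)
    | vstr s =>
      simp only [List.foldl_cons, pvGetStepA, pvGetB]
      exact pvGetStepA_none ps

theorem pvBase_eq (f : String) (r : List (String × List (String × String))) :
    pvBaseA (pvGetNestedA r f) = pvBaseB f r := by
  unfold pvBaseA pvBaseB pvGetNestedA
  rw [pvGet_eq]

theorem pvCollect_eq (l : List (List Char)) : pvCollectA l = pvIntPrefixB l := by
  induction l with
  | nil => rfl
  | cons p ps ih =>
    simp only [pvCollectA, pvIntPrefixB]
    cases PySem.Int.ofChars? p <;> simp [ih]

theorem pvPad_eq (l : List Int) : pvPadA l = l ++ List.replicate (3 - l.length) 0 := by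
  by_cases h3 : 3 ≤ l.length
  · rw [pvPadA]; simp [Nat.sub_eq_zero_of_le h3]; omega
  · rcases l with _|⟨a,l⟩
    · rw [pvPadA]; norm_num; rw [pvPadA]; norm_num; rw [pvPadA]; norm_num; rw [pvPadA]; norm_num; rfl
    · rcases l with _|⟨b,l⟩
      · rw [pvPadA]; norm_num; rw [pvPadA]; norm_num; rw [pvPadA]; norm_num; rfl
      · rcases l with _|⟨c,l⟩
        · rw [pvPadA]; norm_num; rw [pvPadA]; norm_num
        · simp at h3

theorem pvParse_eq (f : String) (r : List (String × List (String × String))) :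
    pvParseVersionA (pvGetNestedA r f) = pvVKeyB f r := by
  unfold pvParseVersionA pvVKeyB pvGetNestedA
  rw [pvGet_eq]
  cases pvGetB (PvVal.vouter r) ((PySem.Chars.splitOn f.toList ['.']).map String.ofList) with
  | none => rfl
  | some v =>
    cases v with
    | vouter d => rfl
    | vinner d => rfl
    | vstr s =>
      by_cases hs : s = "" <;> simp [hs, pvPad_eq, pvCollect_eq]
theorem pvStepA_getD
    (d : PySem.Dict String (List (List (String × List (String × String)))))
    (b : String)
    (r : List (String × List (String × String))) (k : String) :
    ((if d.contains b then d else d.insert b []).modify b [] (fun g => g ++ [r])).getD k []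
      = if k = b then d.getD k [] ++ [r] else d.getD k [] := by
  by_cases hc : d.contains b = true
  · rw [if_pos hc, PySem.Dict.getD_modify]
    by_cases hk : k = b
    · simp [hk]
    · simp [hk]
  · rw [if_neg hc, PySem.Dict.getD_modify]
    by_cases hk : k = b
    · subst hk
      simp [PySem.Dict.getD_insert_self, PySem.Dict.getD_of_not_contains d ([] : List (List (String × List (String × String)))) (by simpa using hc)]
    · simp [hk, PySem.Dict.getD_insert_of_ne d ([] : List (List (String × List (String × String)))) [] hk]

theorem pvStepA_keys
    (d : PySem.Dict String (List (List (String × List (String × String)))))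
    (b : String)
    (r : List (String × List (String × String))) :
    ((if d.contains b then d else d.insert b []).modify b [] (fun g => g ++ [r])).keys
      = PySem.Set.add d.keys b := by
  by_cases hc : d.contains b = true
  · rw [if_pos hc, PySem.Dict.keys_modify, PySem.Dict.keys_insert_of_contains _ _ hc,
      PySem.Set.add_of_mem ((PySem.Dict.contains_iff_mem_keys d b).mp hc)]
  · rw [if_neg hc, PySem.Dict.keys_modify,
      PySem.Dict.keys_insert_of_contains _ _ (PySem.Dict.contains_insert_self d b []),
      PySem.Dict.keys_insert_of_not_contains _ _ (by simpa using hc),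
      PySem.Set.add_of_not_mem (fun hm => hc ((PySem.Dict.contains_iff_mem_keys d b).mpr hm))]
theorem pvFoldA_getD (base : List (String × List (String × String)) → String)
    (l : List (List (String × List (String × String))))
    (d : PySem.Dict String (List (List (String × List (String × String))))) (k : String) :
    (l.foldl (fun d r =>
        (if d.contains (base r) then d else d.insert (base r) []).modify (base r) [] (fun g => g ++ [r])) d).getD k []
      = d.getD k [] ++ l.filter (fun r => base r == k) := by
  induction l generalizing d with
  | nil => simp
  | cons r rest ih =>
    rw [List.foldl_cons, ih, pvStepA_getD d (base r) r k]
    by_cases hk : k = base r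
    · simp [hk]
    · have hb : (base r == k) = false := by
        simp only [beq_eq_false_iff_ne, ne_eq]; exact fun e => hk e.symm
      simp [hb, hk]

theorem pvFoldA_keys (base : List (String × List (String × String)) → String)
    (l : List (List (String × List (String × String))))
    (d : PySem.Dict String (List (List (String × List (String × String))))) :
    (l.foldl (fun d r =>
        (if d.contains (base r) then d else d.insert (base r) []).modify (base r) [] (fun g => g ++ [r])) d).keys
      = PySem.Set.update d.keys (l.map base) := by
  induction l generalizing d with
  | nil => simp [PySem.Set.update]
  | cons r rest ih =>
    rw [List.foldl_cons, ih, pvStepA_keys d (base r) r, List.map_cons, PySem.Set.update_cons]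
-- the tags B builds, starting positions at s, over (group index, group) pairs
def pvTagS {α : Type} (egs : List (Int × List α)) (s : Int) : List (Int × Int × α) :=
  egs.flatMap (fun gk => (PySem.List.enumerate gk.2 s).map (fun pi => (pi.1, gk.1, pi.2)))

theorem pv_tail_le_pairs {α : Type} (egs : List (Int × List α)) :
    (egs.map (fun gk => gk.2.tail.length)).sum ≤ (egs.map (fun gk => gk.2.length)).sum := by
  induction egs with
  | nil => simp
  | cons g rest ih =>
    simp only [List.map_cons, List.sum_cons]
    have : g.2.tail.length ≤ g.2.length := by cases g.2 <;> simp
    omega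

theorem pv_tail_lt_pairs {α : Type} (egs : List (Int × List α))
    (h : egs.all (fun gk => gk.2.isEmpty) = false) :
    (egs.map (fun gk => gk.2.tail.length)).sum < (egs.map (fun gk => gk.2.length)).sum := by
  induction egs with
  | nil => simp at h
  | cons g rest ih =>
    simp only [List.all_cons, Bool.and_eq_false_iff] at h
    simp only [List.map_cons, List.sum_cons]
    rcases h with h | h
    · have h1 : g.2.tail.length < g.2.length := by
        cases hg : g.2 with
        | nil => rw [hg] at h; simp at h
        | cons x t => simp
      have := pv_tail_le_pairs rest
      omega
    · have := ih h
      have : g.2.tail.length ≤ g.2.length := by cases g.2 <;> simp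
      omega

-- position-major traversal of the tagged groups (the round-robin order, with tags)
def pvPM {α : Type} (egs : List (Int × List α)) (p : Int) : List (Int × Int × α) :=
  if h : egs.all (fun gk => gk.2.isEmpty) then [] else
    egs.filterMap (fun gk => gk.2.head?.map (fun x => (p, gk.1, x)))
      ++ pvPM (egs.map (fun gk => (gk.1, gk.2.tail))) (p + 1)
termination_by (egs.map (fun gk => gk.2.length)).sum
decreasing_by
  rw [List.map_map, show ((fun gk : Int × List α => gk.2.length) ∘ fun x : {x // x ∈ egs} => ((x : Int × List α).1, (x : Int × List α).2.tail))
      = ((fun gk : Int × List α => gk.2.tail.length) ∘ (fun x : {x // x ∈ egs} => (x : Int × List α))) from rfl,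
    ← List.map_map, List.attach_map_subtype_val]
  exact pv_tail_lt_pairs egs (by simpa using h)


theorem pvTagS_empty {α : Type} (egs : List (Int × List α)) (p : Int)
    (h : egs.all (fun gk => gk.2.isEmpty)) : pvTagS egs p = [] := by
  apply List.flatMap_eq_nil_iff.mpr
  intro gk hgk
  have : gk.2.isEmpty := by
    have := List.all_eq_true.mp h gk hgk; simpa using this
  rw [List.isEmpty_iff.mp this]
  rfl

theorem pvTagS_split {α : Type} (egs : List (Int × List α)) (p : Int) :
    (pvTagS egs p).Perm
      (egs.filterMap (fun gk => gk.2.head?.map (fun x => (p, gk.1, x)))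
        ++ pvTagS (egs.map (fun gk => (gk.1, gk.2.tail))) (p + 1)) := by
  induction egs with
  | nil => simp [pvTagS]
  | cons gk rest ih =>
    simp only [pvTagS, List.flatMap_cons, List.map_cons, List.filterMap_cons]
    cases hg : gk.2 with
    | nil =>
      simp only [PySem.List.enumerate_nil, List.map_nil, List.nil_append,
        List.head?_nil, Option.map_none, List.tail_nil]
      simpa [pvTagS] using ih
    | cons x t =>
      simp only [PySem.List.enumerate_cons, List.map_cons, List.head?_cons,
        Option.map_some, List.tail_cons, List.cons_append]
      refine List.Perm.cons _ ?_
      refine List.Perm.trans ?_ (List.perm_append_comm_assoc _ _ _)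
      exact List.Perm.append_left _ (by simpa [pvTagS] using ih)
theorem pvPM_proj {α : Type} (egs0 : List (Int × List α)) (p0 : Int) :
    (pvPM egs0 p0).map (·.2.2) = pvRR (egs0.map (·.2)) := by
  suffices H : ∀ (n : Nat) (egs : List (Int × List α)) (p : Int),
      (egs.map (fun gk => gk.2.length)).sum = n →
      (pvPM egs p).map (·.2.2) = pvRR (egs.map (·.2)) by exact H _ egs0 p0 rfl
  intro n
  induction n using Nat.strong_induction_on with
  | _ n ih =>
    intro egs p hn
    have hcond : (egs.map (·.2)).all List.isEmpty = egs.all (fun gk => gk.2.isEmpty) := by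
      rw [List.all_map]; rfl
    rw [pvPM, pvRR]
    by_cases h : egs.all (fun gk => gk.2.isEmpty)
    · rw [dif_pos h, dif_pos (by rw [hcond]; exact h)]; rfl
    · rw [dif_neg h, dif_neg (by rw [hcond]; exact h)]
      rw [List.map_append]
      congr 1
      · rw [List.map_filterMap, List.filterMap_map]
        congr 1
        funext gk
        show (gk.2.head?.map (fun x => (p, gk.1, x))).map (fun t => t.2.2) = gk.2.head?
        rw [Option.map_map]
        cases gk.2.head? <;> rfl
      · have hm : (egs.map (fun gk => (gk.1, gk.2.tail))).map (·.2) = (egs.map (·.2)).map List.tail := by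
          simp [List.map_map]
        rw [← hm]
        refine ih _ ?_ _ _ rfl
        rw [← hn, List.map_map]
        have h1 := pv_tail_lt_pairs egs (by simpa using h)
        have h2 : (List.map ((fun gk : Int × List α => gk.2.length) ∘ fun gk => (gk.1, gk.2.tail)) egs)
            = List.map (fun gk => gk.2.tail.length) egs := rfl
        rw [h2]; exact h1
theorem pvTagS_perm {α : Type} (egs0 : List (Int × List α)) (p0 : Int) :
    (pvPM egs0 p0).Perm (pvTagS egs0 p0) := by
  suffices H : ∀ (n : Nat) (egs : List (Int × List α)) (p : Int),
      (egs.map (fun gk => gk.2.length)).sum = n →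
      (pvPM egs p).Perm (pvTagS egs p) by exact H _ egs0 p0 rfl
  intro n
  induction n using Nat.strong_induction_on with
  | _ n ih =>
    intro egs p hn
    rw [pvPM]
    by_cases h : egs.all (fun gk => gk.2.isEmpty)
    · rw [dif_pos h, pvTagS_empty egs p h]
    · rw [dif_neg h]
      refine List.Perm.trans ?_ (pvTagS_split egs p).symm
      refine List.Perm.append_left _ ?_
      refine ih _ ?_ _ _ rfl
      rw [← hn, List.map_map]
      have h1 := pv_tail_lt_pairs egs (by simpa using h)
      have h2 : (List.map ((fun gk : Int × List α => gk.2.length) ∘ fun gk => (gk.1, gk.2.tail)) egs)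
          = List.map (fun gk => gk.2.tail.length) egs := rfl
      rw [h2]; exact h1

theorem pvPM_mem {α : Type} (egs0 : List (Int × List α)) (p0 : Int) (t : Int × Int × α)
    (ht : t ∈ pvPM egs0 p0) : p0 ≤ t.1 ∧ t.2.1 ∈ egs0.map (·.1) := by
  suffices H : ∀ (n : Nat) (egs : List (Int × List α)) (p : Int),
      (egs.map (fun gk => gk.2.length)).sum = n →
      ∀ t ∈ pvPM egs p, p ≤ t.1 ∧ t.2.1 ∈ egs.map (·.1) by exact H _ egs0 p0 rfl t ht
  intro n
  induction n using Nat.strong_induction_on with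
  | _ n ih =>
    intro egs p hn t ht
    rw [pvPM] at ht
    by_cases h : egs.all (fun gk => gk.2.isEmpty)
    · rw [dif_pos h] at ht; simp at ht
    · rw [dif_neg h] at ht
      rcases List.mem_append.mp ht with hrow | hrest
      · rcases List.mem_filterMap.mp hrow with ⟨gk, hgk, hf⟩
        rcases Option.map_eq_some_iff.mp hf with ⟨x, hx, rfl⟩
        exact ⟨le_refl _, List.mem_map.mpr ⟨gk, hgk, rfl⟩⟩
      · have := ih _ (by
            rw [← hn, List.map_map]
            have h1 := pv_tail_lt_pairs egs (by simpa using h)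
            exact h1) _ _ rfl t hrest
        refine ⟨by omega, ?_⟩
        simpa [List.map_map] using this.2
theorem pvRow_pairwise {α : Type} (N p : Int) (egs : List (Int × List α))
    (hp : (egs.map (·.1)).Pairwise (· < ·)) :
    (egs.filterMap (fun gk => gk.2.head?.map (fun x => (p, gk.1, x)))).Pairwise
      (fun a b => a.1 * (N + 1) + a.2.1 < b.1 * (N + 1) + b.2.1) := by
  induction egs with
  | nil => simp
  | cons gk rest ih =>
    simp only [List.map_cons, List.pairwise_cons] at hp
    obtain ⟨hfirst, hrest⟩ := hp
    simp only [List.filterMap_cons]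
    cases hgk : gk.2.head? with
    | none => exact ih hrest
    | some x =>
      simp only [Option.map_some]
      refine List.Pairwise.cons ?_ (ih hrest)
      intro b hb
      rcases List.mem_filterMap.mp hb with ⟨gk', hgk', hf⟩
      rcases Option.map_eq_some_iff.mp hf with ⟨x', hx', rfl⟩
      have hlt : gk.1 < gk'.1 := hfirst _ (List.mem_map.mpr ⟨gk', hgk', rfl⟩)
      simpa using add_lt_add_left hlt (p * (N + 1))

theorem pvPM_pairwise {α : Type} (N : Int) (egs0 : List (Int × List α)) (p0 : Int)
    (hb0 : ∀ gi ∈ egs0.map (·.1), 0 ≤ gi ∧ gi ≤ N)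
    (hp0 : (egs0.map (·.1)).Pairwise (· < ·)) :
    (pvPM egs0 p0).Pairwise (fun a b => a.1 * (N + 1) + a.2.1 < b.1 * (N + 1) + b.2.1) := by
  suffices H : ∀ (n : Nat) (egs : List (Int × List α)) (p : Int),
      (egs.map (fun gk => gk.2.length)).sum = n →
      (∀ gi ∈ egs.map (·.1), 0 ≤ gi ∧ gi ≤ N) →
      (egs.map (·.1)).Pairwise (· < ·) →
      (pvPM egs p).Pairwise (fun a b => a.1 * (N + 1) + a.2.1 < b.1 * (N + 1) + b.2.1) by
    exact H _ egs0 p0 rfl hb0 hp0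
  intro n
  induction n using Nat.strong_induction_on with
  | _ n ih =>
    intro egs p hn hb hp
    rw [pvPM]
    by_cases h : egs.all (fun gk => gk.2.isEmpty)
    · rw [dif_pos h]; exact List.Pairwise.nil
    · rw [dif_neg h]
      have hfst : ((egs.map (fun gk => (gk.1, gk.2.tail))).map (·.1)) = egs.map (·.1) := by
        rw [List.map_map]; rfl
      refine List.pairwise_append.mpr ⟨pvRow_pairwise N p egs hp, ?_, ?_⟩
      · refine ih _ (by
            rw [← hn, List.map_map]
            exact pv_tail_lt_pairs egs (by simpa using h)) _ _ rfl ?_ ?_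
        · rw [hfst]; exact hb
        · rw [hfst]; exact hp
      · intro a ha b hb'
        rcases List.mem_filterMap.mp ha with ⟨gk, hgk, hf⟩
        rcases Option.map_eq_some_iff.mp hf with ⟨x, hx, rfl⟩
        have hgi := hb _ (List.mem_map.mpr ⟨gk, hgk, rfl⟩)
        have hmem := pvPM_mem _ _ _ hb'
        have hb2 : 0 ≤ b.2.1 := by
          have : b.2.1 ∈ egs.map (·.1) := by rw [← hfst]; exact hmem.2
          exact (hb _ this).1
        have hN : 0 ≤ N := le_trans hgi.1 hgi.2
        have hstep : (p + 1) * (N + 1) ≤ b.1 * (N + 1) :=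
          mul_le_mul_of_nonneg_right (by omega) (by omega)
        have hexp : (p + 1) * (N + 1) = p * (N + 1) + (N + 1) := by ring
        simp only
        have h1 : p * (N + 1) + gk.1 < p * (N + 1) + (N + 1) := by omega
        linarith
theorem pvEnumerate_map {α β : Type} (f : α → β) (l : List α) (s : Int) :
    PySem.List.enumerate (l.map f) s = (PySem.List.enumerate l s).map (fun p => (p.1, f p.2)) := by
  induction l generalizing s with
  | nil => rfl
  | cons x xs ih => simp [PySem.List.enumerate_cons, ih]

theorem pvZipFilter (mf : String) (results : List (List (String × List (String × String)))) (k : String) :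
    ((results.zip (results.map (pvBaseB mf))).filter (fun rk => rk.2 == k)).map (·.1)
      = results.filter (fun r => pvBaseB mf r == k) := by
  conv_lhs => rw [show results.zip (results.map (pvBaseB mf))
      = (results.map id).zip (results.map (pvBaseB mf)) by rw [List.map_id]]
  rw [List.zip_map', List.filter_map, List.map_map]
  simp [Function.comp_def]

theorem version_aware_ranking_spec' (results : List (List (String × List (String × String)))) (mf vf : String) :
    version_aware_ranking results mf vf = version_aware_ranking_alt results mf vf := by
  have hbase : (fun r => pvBaseA (pvGetNestedA r mf)) = pvBaseB mf := funext (pvBase_eq mf)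
  have hkey : (fun r => pvParseVersionA (pvGetNestedA r vf)) = pvVKeyB vf := funext (pvParse_eq vf)
  -- names
  set ids := results.map (pvBaseB mf) with hids
  set gfun := (fun k => PySem.List.sorted (results.filter (fun r => pvBaseB mf r == k)) (pvVKeyB vf) true) with hgfun
  set egs := PySem.List.enumerate ((PySem.Set.ofList ids).map gfun) 0 with hegs
  -- A side
  have hA : version_aware_ranking results mf vf = pvRR ((PySem.Set.ofList ids).map gfun) := by
    unfold version_aware_ranking
    simp only []
    rw [pvFoldA_keys (fun r => pvBaseA (pvGetNestedA r mf)) results PySem.Dict.empty]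
    rw [PySem.Dict.keys_empty, PySem.Set.update_nil_left, hbase]
    refine congrArg pvRR (List.map_congr_left (fun k _ => ?_))
    rw [pvFoldA_getD (fun r => pvBaseA (pvGetNestedA r mf)) results PySem.Dict.empty k]
    rw [PySem.Dict.getD_empty, List.nil_append]
    simp only [pvBase_eq, pvParse_eq]
    rfl
  -- B side
  have hB : version_aware_ranking_alt results mf vf =
      (PySem.List.sorted (pvTagS egs 0) (fun t => t.1 * ((results.length : Int) + 1) + t.2.1) false).map (·.2.2) := by
    unfold version_aware_ranking_alt
    simp only []
    rw [show (List.foldl (fun (acc : List String) i => if acc.contains i = true then acc else acc ++ [i]) []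
        (List.map (pvBaseB mf) results)) = PySem.Set.ofList ids from rfl]
    rw [hegs, pvEnumerate_map, pvTagS, List.flatMap_map]
    congr 2
    refine congrFun (congrArg List.flatMap (funext fun gk => ?_)) _
    simp only
    rw [pvZipFilter mf results gk.2]
  -- sorted = position-major
  have hsorted : PySem.List.sorted (pvTagS egs 0) (fun t => t.1 * ((results.length : Int) + 1) + t.2.1) false
      = pvPM egs 0 := by
    apply PySem.List.sorted_eq_of_perm_of_pairwise_lt
    · exact pvTagS_perm egs 0
    · refine pvPM_pairwise (results.length : Int) egs 0 ?_ ?_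
      · intro gi hgi
        rw [hegs, PySem.List.map_fst_enumerate] at hgi
        have := (PySem.List.mem_pyRange_one).mp hgi
        have hlen : ((PySem.Set.ofList ids).map gfun).length ≤ results.length := by
          rw [List.length_map]
          calc (PySem.Set.ofList ids).length ≤ ids.length := PySem.Set.length_ofList_le ids
            _ = results.length := by rw [hids, List.length_map]
        constructor
        · omega
        · have : gi < ((((PySem.Set.ofList ids).map gfun).length : Int)) := by omega
          have h2 : (((PySem.Set.ofList ids).map gfun).length : Int) ≤ (results.length : Int) := by
            exact_mod_cast hlen
          omega
      · rw [hegs]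
        have := PySem.List.pairwise_lt_enumerate ((PySem.Set.ofList ids).map gfun) 0
        rw [List.pairwise_map]
        exact this
  rw [hA, hB, hsorted, pvPM_proj, hegs, PySem.List.map_snd_enumerate]

-- ===== VERDICT (by name: the statement is the Claim_ definition above) =====
theorem version_aware_ranking_spec : Claim_equal_version_aware_ranking := by
  intro results model_id_field version_field _hdom
  unfold Spec_version_aware_ranking
  exact version_aware_ranking_spec' results model_id_field version_field
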